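-- pv_equiv track=rewrite | github.com/brokenfloppydisk/Ciphers | alphabet.py | keyword_text
-- ===== SOURCE A (Python) =====
-- from string import ascii_lowercase
--
-- def keyword_text(keyword: str) -> str:
--     """Generates a dict
--     """
--     # Normalize keyword (remove duplicates and make lowercase)
--     new_keyword = ""
--
--     # Iterate through every item in the keyword, as a lowercase letter
--     for i in keyword.lower():
--         # Add unique lowercase letters to the new keyword
--         if i not in new_keyword and i in ascii_lowercase:
--             new_keyword += i
--
--     # Set the keyword to the normalized keyword
--     keyword = new_keyword
--
--     # Create a list of the letters in the alphabet not in the keyword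
--     text = [i for i in ascii_lowercase if i not in keyword]
--
--     # Add keyword to the start of the alphabet using list slicing
--     text[:0] = list(keyword)
--
--     # Convert the list to a string
--     text = "".join(text)
--
--     # Return the final string
--     return text
-- ===== SOURCE B (Python) =====
-- from string import ascii_lowercase
--
-- def keyword_text(keyword: str) -> str:
--     # Rank-and-sort: record the first-occurrence position of each alphabet
--     # letter in the lowered keyword, then sort the 26 letters by that rank
--     # (absent letters rank after all present ones, in alphabetical order).
--     kw = keyword.lower()
--     n = len(kw)
--     first = {}
--     for pos, ch in enumerate(kw):
--         if ch in ascii_lowercase and ch not in first: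
--             first[ch] = pos
--     return "".join(sorted(ascii_lowercase, key=lambda c: first.get(c, n + ord(c))))
-- ===== Notes on version B (the rewrite author's own statement) =====
-- stated objective: alternative
-- what changed: Instead of A's dedup-then-complement-then-prepend list building, B computes a first-occurrence rank for each alphabet letter in one indexing pass over the lowered keyword and obtains the result as a single stable sort of the 26 alphabet letters by that rank (absent letters rank after all present ones, alphabetically).
import Mathlib
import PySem

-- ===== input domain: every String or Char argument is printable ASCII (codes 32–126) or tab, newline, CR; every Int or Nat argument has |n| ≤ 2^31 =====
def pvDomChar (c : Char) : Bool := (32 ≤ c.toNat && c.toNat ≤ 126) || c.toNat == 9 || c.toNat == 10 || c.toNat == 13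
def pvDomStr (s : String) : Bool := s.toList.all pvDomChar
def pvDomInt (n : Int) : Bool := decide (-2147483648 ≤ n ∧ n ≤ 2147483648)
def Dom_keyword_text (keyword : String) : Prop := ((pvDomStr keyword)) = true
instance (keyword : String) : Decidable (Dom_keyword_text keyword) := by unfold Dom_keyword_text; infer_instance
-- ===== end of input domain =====

-- B replaces A's dedup/complement/prepend list building by a rank-and-sort: one indexing
-- pass records each letter's first-occurrence position, then the 26 alphabet letters are
-- sorted by that rank (objective: alternative).

-- string.ascii_lowercase
def asciiLower : List Char :=
  ['a','b','c','d','e','f','g','h','i','j','k','l','m',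
   'n','o','p','q','r','s','t','u','v','w','x','y','z']

-- ===== PORT A =====
-- `i not in new_keyword` / `i in ascii_lowercase` test a 1-char string for membership
-- in a string: for single characters this is exactly character membership (List.contains).
def keyword_text (keyword : String) : String :=
  let newKeyword : List Char :=
    (PySem.Chars.lower keyword.toList).foldl
      (fun acc i => if ¬ acc.contains i ∧ asciiLower.contains i then acc ++ [i] else acc) []
  let text : List Char := asciiLower.filter (fun i => ¬ newKeyword.contains i)
  -- text[:0] = list(keyword); "".join(text)
  String.mk (newKeyword ++ text)

-- ===== PORT B =====
-- first : dict letter -> first-occurrence position; result = sorted(alphabet, key=rank)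
def keyword_text_alt (keyword : String) : String :=
  let kw : List Char := PySem.Chars.lower keyword.toList
  let n : Int := kw.length
  let first : PySem.Dict Char Int :=
    (PySem.List.enumerate kw).foldl
      (fun d p => if asciiLower.contains p.2 ∧ ¬ PySem.Dict.contains d p.2
                  then PySem.Dict.insert d p.2 p.1 else d)
      PySem.Dict.empty
  String.mk (PySem.List.sorted asciiLower (fun c => PySem.Dict.getD first c (n + (c.toNat : Int))) false)

-- ===== PRECONDITION & SPEC =====
def Spec_keyword_text (keyword : String) (out : String) : Prop := out = keyword_text_alt keyword
instance (keyword : String) (out : String) : Decidable (Spec_keyword_text keyword out) := by unfold Spec_keyword_text; infer_instance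

-- ===== CLAIM (what is proved, stated in full; the proofs are below) =====
def Claim_equal_keyword_text : Prop := ∀ (keyword : String), Dom_keyword_text keyword → Spec_keyword_text keyword (keyword_text keyword)

-- ===== LEMMAS AND PROOFS =====

-- abbreviations for the two folds
def dictStep : PySem.Dict Char Int → Int × Char → PySem.Dict Char Int :=
  fun d p => if asciiLower.contains p.2 ∧ ¬ PySem.Dict.contains d p.2
             then PySem.Dict.insert d p.2 p.1 else d

def accStep : List Char → Char → List Char :=
  fun acc i => if ¬ acc.contains i ∧ asciiLower.contains i then acc ++ [i] else acc

-- Joint invariant of A's dedup fold and B's first-occurrence dict fold: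
-- the dict's keys ARE A's accumulator, keys stay unique and in the alphabet,
-- and the stored positions are strictly increasing and below the scan frontier.
theorem dict_inv (l : List Char) (s : Int) (d : PySem.Dict Char Int)
    (h1 : (PySem.Dict.keys d).Nodup)
    (h2 : ∀ p ∈ d.items, p.2 < s)
    (h3 : d.items.Pairwise (fun p q => p.2 < q.2))
    (h4 : ∀ k ∈ PySem.Dict.keys d, k ∈ asciiLower) :
    let d' := (PySem.List.enumerate l s).foldl dictStep d
    PySem.Dict.keys d' = l.foldl accStep (PySem.Dict.keys d)
    ∧ (PySem.Dict.keys d').Nodup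
    ∧ (∀ p ∈ d'.items, p.2 < s + l.length)
    ∧ d'.items.Pairwise (fun p q => p.2 < q.2)
    ∧ (∀ k ∈ PySem.Dict.keys d', k ∈ asciiLower) := by
  induction l generalizing s d with
  | nil =>
    refine ⟨rfl, h1, ?_, h3, h4⟩
    intro p hp; have := h2 p hp; simp; omega
  | cons c t ih =>
    simp only [PySem.List.enumerate_cons, List.foldl_cons]
    by_cases hc : asciiLower.contains c = true ∧ ¬ PySem.Dict.contains d c = true
    · have hck : c ∉ PySem.Dict.keys d := by
        intro hmem
        exact hc.2 ((PySem.Dict.contains_iff_mem_keys d c).mpr hmem)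
      have hstep : dictStep d (s, c) = PySem.Dict.insert d c s := by
        simp only [dictStep, if_pos hc]
      have hnc : PySem.Dict.contains d c = false := by
        cases h : PySem.Dict.contains d c
        · rfl
        · exact absurd h hc.2
      have hkeys : PySem.Dict.keys (PySem.Dict.insert d c s) = PySem.Dict.keys d ++ [c] :=
        PySem.Dict.keys_insert_of_not_contains d s hnc
      have hitems : (PySem.Dict.insert d c s).items = d.items ++ [(c, s)] :=
        PySem.Dict.items_insert_of_not_contains d s hnc
      have h1' : (PySem.Dict.keys (PySem.Dict.insert d c s)).Nodup := by
        rw [hkeys]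
        refine List.Nodup.append h1 (by simp) ?_
        simpa [List.disjoint_singleton] using hck
      have h2' : ∀ p ∈ (PySem.Dict.insert d c s).items, p.2 < s + 1 := by
        intro p hp
        rw [hitems] at hp
        rcases List.mem_append.mp hp with h | h
        · have := h2 p h; omega
        · simp at h; rw [h]; omega
      have h3' : (PySem.Dict.insert d c s).items.Pairwise (fun p q => p.2 < q.2) := by
        rw [hitems]
        refine List.pairwise_append.mpr ⟨h3, by simp, ?_⟩
        intro p hp q hq
        simp at hq
        rw [hq]
        exact h2 p hp
      have h4' : ∀ k ∈ PySem.Dict.keys (PySem.Dict.insert d c s), k ∈ asciiLower := by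
        intro k hk
        rw [hkeys] at hk
        rcases List.mem_append.mp hk with h | h
        · exact h4 k h
        · simp at h; rw [h]; exact List.mem_of_elem_eq_true hc.1
      obtain ⟨g1, g2, g3, g4, g5⟩ := ih (s + 1) (PySem.Dict.insert d c s) h1' h2' h3' h4'
      rw [hstep]
      refine ⟨?_, g2, ?_, g4, g5⟩
      · rw [g1, hkeys]
        congr 1
        simp only [accStep]
        rw [if_pos]
        exact ⟨by simpa using hck, hc.1⟩
      · intro p hp
        have := g3 p hp
        simp only [List.length_cons] at *
        push_cast at *
        omega
    · have hstep : dictStep d (s, c) = d := by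
        simp only [dictStep, if_neg hc]
      have h2' : ∀ p ∈ d.items, p.2 < s + 1 := fun p hp => by have := h2 p hp; omega
      obtain ⟨g1, g2, g3, g4, g5⟩ := ih (s + 1) d h1 h2' h3 h4
      rw [hstep]
      refine ⟨?_, g2, ?_, g4, g5⟩
      · rw [g1]
        congr 1
        simp only [accStep]
        rw [if_neg]
        intro ⟨ha, hb⟩
        apply hc
        refine ⟨hb, ?_⟩
        intro hcont
        exact ha (by simpa using (PySem.Dict.contains_iff_mem_keys d c).mp hcont)
      · intro p hp
        have := g3 p hp
        simp only [List.length_cons] at *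
        push_cast at *
        omega

-- membership-true filter of a nodup superlist is a permutation of the sublist
theorem perm_filter_mem (l s : List Char) (hl : l.Nodup) (hs : s.Nodup)
    (hsub : ∀ x ∈ l, x ∈ s) :
    (l ++ s.filter (fun i => ¬ l.contains i)).Perm s := by
  have hstep : (l ++ s.filter (fun i => ¬ l.contains i)).Perm
      (s.filter (fun i => l.contains i) ++ s.filter (fun i => ¬ l.contains i)) := by
    refine List.Perm.append_right _ ?_
    apply List.perm_of_nodup_nodup_toFinset_eq hl (List.Nodup.filter _ hs)
    ext a
    simp only [List.mem_toFinset, List.mem_filter]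
    constructor
    · intro ha; exact ⟨hsub a ha, by simpa using ha⟩
    · intro ha; simpa using ha.2
  refine hstep.trans ?_
  have := List.filter_append_perm (fun i => l.contains i) s
  refine List.Perm.trans ?_ this
  apply List.Perm.append_left
  apply List.Perm.of_eq
  apply List.filter_congr
  intro x _
  simp

theorem keyword_text_spec' (keyword : String) :
    keyword_text keyword = keyword_text_alt keyword := by
  unfold keyword_text keyword_text_alt
  set kw := PySem.Chars.lower keyword.toList with hkw
  set n : Int := (kw.length : Int) with hn
  set d' := (PySem.List.enumerate kw 0).foldl dictStep PySem.Dict.empty with hd'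
  set key : Char → Int := fun c => PySem.Dict.getD d' c (n + (c.toNat : Int)) with hkey
  change String.mk ((kw.foldl accStep []) ++ asciiLower.filter
      (fun i => ¬ (kw.foldl accStep []).contains i))
    = String.mk (PySem.List.sorted asciiLower key false)
  obtain ⟨g1, g2, g3, g4, g5⟩ :=
    dict_inv kw 0 PySem.Dict.empty (by simp)
      (by intro p hp; simp [PySem.Dict.empty] at hp)
      (by simp [PySem.Dict.empty])
      (by simp)
  rw [← hd'] at g1 g2 g3 g4 g5
  simp only [PySem.Dict.keys_empty] at g1
  rw [← g1]
  -- helper facts about the key function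
  have hkeyval : ∀ p ∈ d'.items, key p.1 = p.2 := by
    intro p hp
    have hp' : (p.1, p.2) ∈ d'.items := by simpa using hp
    exact PySem.Dict.getD_of_mem_items d' hp' g2 _
  have hvlt : ∀ p ∈ d'.items, p.2 < n := by
    intro p hp
    have := g3 p hp
    omega
  have hkeyin : ∀ a ∈ PySem.Dict.keys d', key a < n := by
    intro a ha
    have hmap : a ∈ d'.items.map (·.1) := by
      simpa only [PySem.Dict.keys] using ha
    obtain ⟨p, hp, hpa⟩ := List.mem_map.mp hmap
    rw [← hpa, hkeyval p hp]
    exact hvlt p hp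
  have hkeyout : ∀ a, a ∉ PySem.Dict.keys d' → key a = n + (a.toNat : Int) := by
    intro a ha
    have hnc : PySem.Dict.contains d' a = false := by
      cases h : PySem.Dict.contains d' a
      · rfl
      · exact absurd ((PySem.Dict.contains_iff_mem_keys d' a).mp h) ha
    exact PySem.Dict.getD_of_not_contains d' _ hnc
  -- the pairwise-increasing-key property of A's result list
  have hpair : (PySem.Dict.keys d' ++ asciiLower.filter
      (fun i => ¬ (PySem.Dict.keys d').contains i)).Pairwise (fun a b => key a < key b) := by
    refine List.pairwise_append.mpr ⟨?_, ?_, ?_⟩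
    · have : d'.items.Pairwise (fun p q => key p.1 < key q.1) := by
        refine g4.imp_of_mem ?_
        intro p q hp hq hlt
        rw [hkeyval p hp, hkeyval q hq]
        exact hlt
      exact List.Pairwise.map (S := fun a b => key a < key b)
        (fun (p : Char × Int) => p.1) (fun p q h => h) this
    · have base : asciiLower.Pairwise (fun a b => (a.toNat : Int) < (b.toNat : Int)) := by
        decide
      have hf := base.filter (fun i => decide (¬ (PySem.Dict.keys d').contains i = true))
      refine hf.imp_of_mem ?_
      intro a b ha hb hlt
      have ha' : a ∉ PySem.Dict.keys d' := by
        have := List.of_mem_filter ha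
        simpa using this
      have hb' : b ∉ PySem.Dict.keys d' := by
        have := List.of_mem_filter hb
        simpa using this
      rw [hkeyout a ha', hkeyout b hb']
      omega
    · intro a ha b hb
      have hb' : b ∉ PySem.Dict.keys d' := by
        have := List.of_mem_filter hb
        simpa using this
      rw [hkeyout b hb']
      have := hkeyin a ha
      have : (0 : Int) ≤ (b.toNat : Int) := by positivity
      omega
  have hperm : (PySem.Dict.keys d' ++ asciiLower.filter
      (fun i => ¬ (PySem.Dict.keys d').contains i)).Perm asciiLower :=
    perm_filter_mem (PySem.Dict.keys d') asciiLower g2 (by decide) g5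
  exact congrArg String.mk
    (PySem.List.sorted_eq_of_perm_of_pairwise_lt asciiLower _ key hperm hpair).symm

-- ===== VERDICT (by name: the statement is the Claim_ definition above) =====
theorem keyword_text_spec : Claim_equal_keyword_text := by
  intro keyword _
  exact keyword_text_spec' keyword
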